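-- pv_equiv track=rewrite | github.com/peralese/md_to_docx_table | main-tbl-conversion.py | _normalize_pipe_tables
-- ===== SOURCE A (Python) =====
-- def _normalize_pipe_tables(md_text: str) -> str:
--     """
--     (1) Insert a blank line before any pipe-style table so 'tables' parses it.
--     (2) Collapse extra blank lines *inside* a table block (Markdown tables don't allow them).
--     """
--     lines = md_text.splitlines()
--     out, i = [], 0
--     def is_pipe_row(s: str) -> bool:
--         s = s.strip()
--         return s.startswith("|") and s.count("|") >= 2
--
--     while i < len(lines):
--         line = lines[i]
--         if is_pipe_row(line):
--             if out and out[-1].strip() != "":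
--                 out.append("")  # ensure a blank line before a table block
--             # consume contiguous table rows, skipping blank lines inside the block
--             j = i
--             while j < len(lines):
--                 s = lines[j]
--                 if s.strip() == "":
--                     if j + 1 < len(lines) and is_pipe_row(lines[j + 1]):
--                         j += 1
--                         continue
--                     else:
--                         break
--                 if not is_pipe_row(s):
--                     break
--                 out.append(s)
--                 j += 1
--             i = j
--             continue
--         out.append(line)
--         i += 1
--     return "\n".join(out)
-- ===== SOURCE B (Python) =====
-- def _normalize_pipe_tables(md_text: str) -> str:
--     def is_pipe_row(s: str) -> bool:
--         s = s.strip()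
--         return s.startswith("|") and s.count("|") >= 2
--
--     lines = md_text.splitlines()
--     out = []
--     in_table = False
--     for idx, line in enumerate(lines):
--         if in_table:
--             if is_pipe_row(line):
--                 out.append(line)
--             elif line.strip() == "" and idx + 1 < len(lines) and is_pipe_row(lines[idx + 1]):
--                 pass  # drop blank line inside the table block
--             else:
--                 in_table = False
--                 out.append(line)
--         elif is_pipe_row(line):
--             if out and out[-1].strip() != "":
--                 out.append("")
--             out.append(line)
--             in_table = True
--         else:
--             out.append(line)
--     return "\n".join(out)
-- ===== Notes on version B (the rewrite author's own statement) =====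
-- stated objective: simpler
-- what changed: Replaced A's nested index-based consume-the-table-block inner loop (while over j with i=j resync) with a single pass over the lines carrying an in_table boolean and a one-line lookahead for blanks inside a table.
import Mathlib
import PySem

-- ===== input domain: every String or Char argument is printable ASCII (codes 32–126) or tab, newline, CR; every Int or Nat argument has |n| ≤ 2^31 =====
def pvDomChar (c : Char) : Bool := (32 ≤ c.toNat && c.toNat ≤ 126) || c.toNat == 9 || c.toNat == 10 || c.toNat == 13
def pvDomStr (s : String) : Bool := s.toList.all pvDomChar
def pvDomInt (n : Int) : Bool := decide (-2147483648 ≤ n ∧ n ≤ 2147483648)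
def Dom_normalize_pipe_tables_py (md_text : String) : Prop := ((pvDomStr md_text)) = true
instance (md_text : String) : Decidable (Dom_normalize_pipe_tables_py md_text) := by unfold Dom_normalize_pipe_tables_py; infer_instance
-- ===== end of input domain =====

-- B replaces A's nested consume-the-table-block inner loop with a single pass
-- carrying an in_table flag (objective: simpler); same return value everywhere.

-- ===== PORT A =====
-- shared helper: Python's local is_pipe_row (identical in A and B)
def isPipeRow (s : String) : Bool :=
  PySem.Str.startswith (PySem.Str.strip s) "|" && decide (2 ≤ PySem.Str.count (PySem.Str.strip s) "|")

-- shared helper: Python's `out and out[-1].strip() != ""` (identical in A and B)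
def needBlank (out : List String) : Bool :=
  match out.getLast? with
  | some last => PySem.Str.strip last != ""
  | none => false

-- A's inner `while j < len(lines)` loop: returns (rows appended, remaining lines)
def innerA : List String → List String × List String
  | [] => ([], [])
  | s :: t =>
    if PySem.Str.strip s = "" then
      match t with
      | next :: _ => if isPipeRow next then innerA t else ([], s :: t)
      | [] => ([], s :: t)
    else if !isPipeRow s then ([], s :: t)
    else ((s :: (innerA t).1), (innerA t).2)

lemma strip_empty_not_pipe {s : String} (h : PySem.Str.strip s = "") : isPipeRow s = false := by
  unfold isPipeRow; rw [h]; decide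

lemma innerA_snd_length (l : List String) : (innerA l).2.length ≤ l.length := by
  induction l with
  | nil => simp [innerA]
  | cons s t ih =>
    by_cases h1 : PySem.Str.strip s = ""
    · cases t with
      | nil => simp [innerA, h1]
      | cons next t' =>
        by_cases h3 : isPipeRow next = true
        · simpa [innerA, h1, h3] using Nat.le_succ_of_le ih
        · simp [innerA, h1, h3]
    · by_cases h2 : isPipeRow s = true
      · simpa [innerA, h1, h2] using Nat.le_succ_of_le ih
      · simp [innerA, h1, h2]

lemma innerA_cons_pipe {s : String} (t : List String) (h : isPipeRow s = true) :
    innerA (s :: t) = (s :: (innerA t).1, (innerA t).2) := by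
  have hs : ¬ PySem.Str.strip s = "" := fun e => by
    rw [strip_empty_not_pipe e] at h; cases h
  simp [innerA, hs, h]

lemma innerA_lt {line : String} (t : List String) (h : isPipeRow line = true) :
    (innerA (line :: t)).2.length < (line :: t).length := by
  rw [innerA_cons_pipe t h]
  have := innerA_snd_length t
  simpa using Nat.lt_succ_of_le this

-- A's outer `while i < len(lines)` loop
def outerA : List String → List String → List String
  | out, [] => out
  | out, line :: t =>
    if _h : isPipeRow line = true then
      outerA ((if needBlank out then out ++ [""] else out) ++ (innerA (line :: t)).1)
             (innerA (line :: t)).2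
    else outerA (out ++ [line]) t
termination_by _ rest => rest.length
decreasing_by
  · exact innerA_lt t _h
  · simp

def normalize_pipe_tables_py (md_text : String) : String :=
  PySem.Str.join "\n" (outerA [] (PySem.Str.splitlines md_text))

-- ===== PORT B =====
-- B's lookahead `idx + 1 < len(lines) and is_pipe_row(lines[idx+1])`
def nextIsPipe : List String → Bool
  | next :: _ => isPipeRow next
  | [] => false

-- B's single pass: state = (in_table, out)
def goB : Bool → List String → List String → List String
  | _, out, [] => out
  | in_table, out, line :: rest =>
    if in_table then
      if isPipeRow line then goB true (out ++ [line]) rest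
      else if PySem.Str.strip line = "" && nextIsPipe rest then goB true out rest
      else goB false (out ++ [line]) rest
    else if isPipeRow line then
      goB true ((if needBlank out then out ++ [""] else out) ++ [line]) rest
    else goB false (out ++ [line]) rest

def normalize_pipe_tables_py_alt (md_text : String) : String :=
  PySem.Str.join "\n" (goB false [] (PySem.Str.splitlines md_text))

-- ===== PRECONDITION & SPEC =====
def Spec_normalize_pipe_tables_py (md_text : String) (out : String) : Prop := out = normalize_pipe_tables_py_alt md_text
instance (md_text : String) (out : String) : Decidable (Spec_normalize_pipe_tables_py md_text out) := by unfold Spec_normalize_pipe_tables_py; infer_instance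

-- ===== CLAIM (what is proved, stated in full; the proofs are below) =====
def Claim_equal_normalize_pipe_tables_py : Prop := ∀ (md_text : String), Dom_normalize_pipe_tables_py md_text → Spec_normalize_pipe_tables_py md_text (normalize_pipe_tables_py md_text)

-- ===== LEMMAS AND PROOFS =====
lemma outerA_nil (out : List String) : outerA out [] = out := by rw [outerA]

lemma outerA_cons_pipe (out : List String) {line : String} (t : List String)
    (h : isPipeRow line = true) :
    outerA out (line :: t)
      = outerA ((if needBlank out then out ++ [""] else out) ++ (innerA (line :: t)).1)
               (innerA (line :: t)).2 := by
  rw [outerA]; simp only [h, dif_pos]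

lemma outerA_cons_not_pipe (out : List String) {line : String} (t : List String)
    (h : isPipeRow line = false) :
    outerA out (line :: t) = outerA (out ++ [line]) t := by
  rw [outerA]; simp only [h, Bool.false_eq_true, dif_neg, not_false_iff]


-- the bridging invariant: A's outer loop = goB false; A's outer loop resumed after
-- the inner consumer = goB true
set_option maxHeartbeats 2000000 in
lemma main_invariant (n : Nat) : ∀ rest : List String, rest.length ≤ n →
    (∀ out, outerA out rest = goB false out rest) ∧
    (∀ out, outerA (out ++ (innerA rest).1) (innerA rest).2 = goB true out rest) := by
  induction n with
  | zero =>
    intro rest hr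
    have : rest = [] := List.eq_nil_of_length_eq_zero (Nat.le_zero.mp hr)
    subst this
    exact ⟨fun out => by simp [outerA_nil, goB],
           fun out => by simp [outerA_nil, goB, innerA]⟩
  | succ n ih =>
    intro rest hr
    cases rest with
    | nil =>
      exact ⟨fun out => by simp [outerA_nil, goB],
             fun out => by simp [outerA_nil, goB, innerA]⟩
    | cons line t =>
      have ht : t.length ≤ n := by simp at hr; omega
      obtain ⟨ihF, ihT⟩ := ih t ht
      constructor
      · intro out
        by_cases hp : isPipeRow line = true
        · rw [outerA_cons_pipe out t hp, innerA_cons_pipe t hp, goB]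
          simp only [hp, Bool.false_eq_true, if_false, if_true]
          rw [show ((if needBlank out then out ++ [""] else out) ++ line :: (innerA t).1)
              = ((if needBlank out then out ++ [""] else out) ++ [line]) ++ (innerA t).1 by simp]
          exact ihT _
        · rw [outerA_cons_not_pipe out t (by simpa using hp), goB]
          simp only [hp, Bool.false_eq_true, if_false]
          exact ihF _
      · intro out
        by_cases hs : PySem.Str.strip line = ""
        · have hp : isPipeRow line = false := strip_empty_not_pipe hs
          cases t with
          | nil =>
            have hin : innerA [line] = ([], [line]) := by rw [innerA]; simp [hs]
            rw [hin, goB]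
            simp only [hp, hs, nextIsPipe, Bool.and_false, Bool.false_eq_true, if_false,
              List.append_nil]
            rw [outerA_cons_not_pipe out [] hp, outerA_nil, goB]
            simp
          | cons next t' =>
            by_cases hn : isPipeRow next = true
            · have hin : innerA (line :: next :: t') = innerA (next :: t') := by
                rw [innerA]; simp only [hs, if_true, hn]
              rw [hin, goB]
              simp only [hp, hs, nextIsPipe, hn, Bool.and_true, Bool.false_eq_true, if_false,
                if_true]
              exact ihT out
            · have hin : innerA (line :: next :: t') = ([], line :: next :: t') := by
                rw [innerA]; simp [hs, hn]
              rw [hin, goB]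
              simp only [hp, hs, nextIsPipe, hn, Bool.and_false, Bool.false_eq_true, if_false,
                List.append_nil]
              rw [outerA_cons_not_pipe out (next :: t') hp]
              exact ihF _
        · by_cases hp : isPipeRow line = true
          · rw [innerA_cons_pipe t hp, goB]
            simp only [hp, if_true]
            rw [show (out ++ line :: (innerA t).1) = (out ++ [line]) ++ (innerA t).1 by simp]
            exact ihT _
          · have hin : innerA (line :: t) = ([], line :: t) := by
              rw [innerA.eq_def]; simp [hs, hp]
            rw [hin, goB]
            simp only [hp, hs, Bool.false_eq_true, if_false, List.append_nil]
            rw [outerA_cons_not_pipe out t (by simpa using hp)]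
            exact ihF _

-- ===== VERDICT (by name: the statement is the Claim_ definition above) =====
theorem normalize_pipe_tables_py_spec : Claim_equal_normalize_pipe_tables_py := by
  intro md_text _
  unfold Spec_normalize_pipe_tables_py normalize_pipe_tables_py normalize_pipe_tables_py_alt
  rw [(main_invariant (PySem.Str.splitlines md_text).length _ le_rfl).1]
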